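-- pv_equiv track=rewrite | github.com/mglevitt/DSC20 | DSC20/hw06.py | undo_recursive_reverse_up_to_n
-- ===== SOURCE A (Python) =====
-- def undo_recursive_reverse_up_to_n(name, n):
--     """
--     Recursively corrects the recursive reverse
--     done on the string up to n characters.
--
--     Restrictions:
--     You should use recursion. You should do input validation.
--
--     Parameters:
--     name (str): The string to be corrected
--     n (int): How many times the string has been previously reversed
--
--     Returns:
--     (str) Corrected string
--
--     Parameters:
--     name (str): The string to be corrected
--     n (int): How many times the string has been previously reversed
--
--     Returns:
--     (str) Corrected string
--
--     >>> undo_recursive_reverse_up_to_n('bNai', 3)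
--     'Nabi'
--     >>> undo_recursive_reverse_up_to_n('mkln', 3)
--     'klmn'
--     >>> undo_recursive_reverse_up_to_n('nlkm', 4)
--     'klmn'
--
--     +++++++++++++++++++++++++
--     WRITE YOUR DOCTESTS BELOW
--     +++++++++++++++++++++++++
--     >>> undo_recursive_reverse_up_to_n('Ls tDaaI ife', 9)
--     'Data Is Life'
--     >>> undo_recursive_reverse_up_to_n('bJAde INe  o 4 $', 12)
--     'I Need A Job 4 $'
--     >>> undo_recursive_reverse_up_to_n('how', '-1')
--     Traceback (most recent call last):
--     ...
--     AssertionError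
--     """
--     assert isinstance(name,str)
--     assert isinstance(n,int) and n>0
--     assert len(name)>=n
--     if n==1:
--         return name
--     else:
--         return undo_recursive_reverse_up_to_n(name[n-1::-1]+name[n:],n-1)
-- ===== SOURCE B (Python) =====
-- def undo_recursive_reverse_up_to_n(name, n):
--     """Two-pointer simulation: each prefix reversal of length k fixes output
--     position k-1 and flips the reading direction of the remaining prefix, so
--     one pass over name[:n] with a lo/hi pointer and a flip flag suffices."""
--     assert isinstance(name, str)
--     assert isinstance(n, int) and n > 0
--     assert len(name) >= n
--     chars = name[:n]
--     lo, hi = 0, n - 1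
--     flipped = False
--     out = []
--     for _ in range(n - 1):
--         if flipped:
--             out.append(chars[hi])
--             hi -= 1
--         else:
--             out.append(chars[lo])
--             lo += 1
--         flipped = not flipped
--     return chars[lo] + ''.join(reversed(out)) + name[n:]
-- ===== Notes on version B (the rewrite author's own statement) =====
-- stated objective: faster
-- what changed: Replaces A's n-step recursion that rebuilds the whole string (reversed prefix + tail) at every level by a single two-pointer pass over name[:n] with a flip flag, fixing one output character per step.
import Mathlib
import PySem

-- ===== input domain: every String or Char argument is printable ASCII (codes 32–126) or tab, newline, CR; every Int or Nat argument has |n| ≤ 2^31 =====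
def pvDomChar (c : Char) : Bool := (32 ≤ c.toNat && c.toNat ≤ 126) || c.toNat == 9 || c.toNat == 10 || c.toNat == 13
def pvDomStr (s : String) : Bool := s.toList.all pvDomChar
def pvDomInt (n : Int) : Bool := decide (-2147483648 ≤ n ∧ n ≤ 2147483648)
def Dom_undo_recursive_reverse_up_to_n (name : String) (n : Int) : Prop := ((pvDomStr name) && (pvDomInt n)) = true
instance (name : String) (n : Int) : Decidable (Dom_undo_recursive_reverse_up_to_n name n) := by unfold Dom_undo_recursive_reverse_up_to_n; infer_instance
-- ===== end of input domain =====

-- B replaces A's n rebuild-the-string recursion steps by one two-pointer pass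
-- over name[:n] with a flip flag (objective: faster, one pass instead of n).

-- ===== PORT A =====
-- Literal port of A. Python's failing asserts (n < 1 or n > len(name)) are
-- excluded by Pre_; the `n ≤ 1` guard returns `name` there only so that the
-- recursion is total (Python returns name exactly at n == 1).
-- `slice?` is none only for step 0, so the `.getD ""` default is never taken.
def undo_recursive_reverse_up_to_n (name : String) (n : Int) : String :=
  if h : n ≤ 1 then name
  else
    undo_recursive_reverse_up_to_n
      (((PySem.Str.slice? name (some (n - 1)) none (-1)).getD "") ++
        PySem.Str.slice name (some n) none)
      (n - 1)
termination_by n.toNat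
decreasing_by omega

-- ===== PORT B =====
-- the for-loop of Source B: fuel = n-1 iterations, state (lo, hi, flipped, out)
def pvAltLoop (chars : List Char) : Nat → Int → Int → Bool → List Char → Int × List Char
  | 0, lo, _, _, out => (lo, out)
  | k + 1, lo, hi, flipped, out =>
    if flipped then
      pvAltLoop chars k lo (hi - 1) (!flipped) (out ++ [(PySem.List.pyGet? chars hi).getD ' '])
    else
      pvAltLoop chars k (lo + 1) hi (!flipped) (out ++ [(PySem.List.pyGet? chars lo).getD ' '])

-- Literal port of B (two pointers over name[:n], code points of the slice);
-- under Pre_ every index is in range, so the `.getD ' '` defaults never fire.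
def undo_recursive_reverse_up_to_n_alt (name : String) (n : Int) : String :=
  let chars := (PySem.Str.slice name none (some n)).toList
  let r := pvAltLoop chars (n - 1).toNat 0 (n - 1) false []
  String.ofList ((PySem.List.pyGet? chars r.1).getD ' ' :: r.2.reverse) ++
    PySem.Str.slice name (some n) none

-- ===== PRECONDITION & SPEC =====
-- exactly the inputs on which A's asserts pass (A raises AssertionError otherwise)
def Pre_undo_recursive_reverse_up_to_n (name : String) (n : Int) : Prop :=
  1 ≤ n ∧ n ≤ (name.toList.length : Int)
instance (name : String) (n : Int) : Decidable (Pre_undo_recursive_reverse_up_to_n name n) := by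
  unfold Pre_undo_recursive_reverse_up_to_n; infer_instance
def pvWitness_undo_recursive_reverse_up_to_n : String × Int := ("bNai", 3)

def Spec_undo_recursive_reverse_up_to_n (name : String) (n : Int) (out : String) : Prop := out = undo_recursive_reverse_up_to_n_alt name n
instance (name : String) (n : Int) (out : String) : Decidable (Spec_undo_recursive_reverse_up_to_n name n out) := by unfold Spec_undo_recursive_reverse_up_to_n; infer_instance

-- ===== CLAIM (what is proved, stated in full; the proofs are below) =====
def Claim_equal_undo_recursive_reverse_up_to_n : Prop := ∀ (name : String) (n : Int), Dom_undo_recursive_reverse_up_to_n name n → Pre_undo_recursive_reverse_up_to_n name n → Spec_undo_recursive_reverse_up_to_n name n (undo_recursive_reverse_up_to_n name n)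

-- ===== LEMMAS AND PROOFS =====

def pvP : List Char → List Char
  | [] => []
  | c :: cs => pvP cs.reverse ++ [c]
termination_by s => s.length
decreasing_by simp


theorem pv_filterMap_countdown {α : Type} (xs : List α) (k : Nat) (hk : k < xs.length) :
    List.filterMap (fun j : Nat => xs[((k : Int) + (-1) * (j : Int)).toNat]?) (List.range (k + 1))
      = (xs.take (k + 1)).reverse := by
  induction k with
  | zero => simp [List.range_succ, List.take_add_one, List.getElem?_eq_getElem (by omega : 0 < xs.length)]
  | succ k ih =>
    rw [List.range_succ_eq_map, List.filterMap_cons, List.filterMap_map]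
    have hget : xs[(((k + 1 : Nat) : Int) + (-1) * ((0:Nat) : Int)).toNat]? = some (xs[k+1]'hk) := by
      have : (((k + 1 : Nat) : Int) + (-1) * ((0:Nat) : Int)).toNat = k + 1 := by push_cast; omega
      rw [this]; simp [List.getElem?_eq_getElem hk]
    rw [hget]
    simp only [Function.comp_def]
    rw [List.filterMap_congr (g := fun j : Nat => xs[((k : Int) + (-1) * (j : Int)).toNat]?)
        (fun a _ => by congr 2; push_cast; omega),
      ih (by omega)]
    have htk : xs.take (k+1+1) = xs.take (k+1) ++ [xs[k+1]] := by
      rw [List.take_add_one, List.getElem?_eq_getElem hk]; rfl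
    rw [htk, List.reverse_append]; rfl

theorem pv_slice?_rev_prefix {α : Type} (xs : List α) (k : Nat) (hk : k < xs.length) :
    PySem.List.slice? xs (some (k : Int)) none (-1) = some ((xs.take (k + 1)).reverse) := by
  unfold PySem.List.slice? PySem.List.sliceIndices
  simp only [if_neg (by norm_num : ¬ (-1 : Int) = 0), if_pos (by norm_num : (-1:Int) < 0),
    if_neg (by omega : ¬ (k:Int) < 0)]
  norm_num
  rw [show min ((k:Int)) ((xs.length:Int) - 1) = (k:Int) from by omega,
    if_pos (by constructor <;> omega : (-1:Int) < (k:Int) ∧ 0 < xs.length),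
    show ((k:Int) + 1).toNat = k + 1 from by omega]
  rw [List.filterMap_congr (g := fun j : Nat => xs[((k : Int) + (-1) * (j : Int)).toNat]?)
      (fun a _ => by congr 2; ring)]
  exact pv_filterMap_countdown xs k hk

theorem pvA_eq (m : Nat) : ∀ (name : String), 1 ≤ m → m ≤ name.toList.length →
    (undo_recursive_reverse_up_to_n name (m : Int)).toList
      = pvP (name.toList.take m) ++ name.toList.drop m := by
  induction m with
  | zero => intro name h; omega
  | succ k ih =>
    intro name _ hlen
    by_cases hk1 : k = 0
    · subst hk1
      rw [undo_recursive_reverse_up_to_n, dif_pos (by norm_num : (((0 + 1 : Nat)) : Int) ≤ 1)]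
      rcases hL : name.toList with _ | ⟨c, cs⟩
      · rw [hL] at hlen; simp at hlen
      · simp [pvP, pvP]
    · -- k ≥ 1
      have hklen : k + 1 ≤ name.toList.length := by exact_mod_cast hlen
      rw [undo_recursive_reverse_up_to_n, dif_neg (by push_cast; omega : ¬ (((k + 1 : Nat)) : Int) ≤ 1)]
      -- the slice? argument
      have hs1 : (((k+1:Nat) : Int) - 1) = (k : Int) := by push_cast; ring
      have hk' : k < name.toList.length := by omega
      have hslice? : PySem.Str.slice? name (some (((k+1:Nat) : Int) - 1)) none (-1)
          = some (String.ofList ((name.toList.take (k+1)).reverse)) := by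
        have hmap := PySem.Str.slice?_map name (some (((k+1:Nat) : Int) - 1)) none (-1)
        rw [hs1] at hmap ⊢
        simp only [PySem.Chars.slice?_eq_listSlice?] at hmap
        rw [pv_slice?_rev_prefix _ k hk'] at hmap
        rcases h : PySem.Str.slice? name (some (k:Int)) none (-1) with _ | t
        · rw [h] at hmap; simp at hmap
        · rw [h] at hmap; simp at hmap
          rw [← hmap, String.ofList_toList]
      rw [hslice?]
      simp only [Option.getD_some, hs1]
      obtain ⟨c, cs, hL⟩ : ∃ c cs, name.toList = c :: cs := by
        rcases h : name.toList with _ | ⟨c, cs⟩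
        · rw [h] at hklen; simp at hklen
        · exact ⟨c, cs, rfl⟩
      have hcs : k ≤ cs.length := by rw [hL] at hklen; simp at hklen; omega
      have hargL : ((String.ofList ((name.toList.take (k+1)).reverse)) ++
          PySem.Str.slice name (some ((k+1:Nat) : Int)) none).toList
          = ((cs.take k).reverse ++ [c]) ++ cs.drop k := by
        rw [show ((k+1:Nat) : Int) = ((k:Int) + 1) from by push_cast; ring] at *
        simp [PySem.Str.toList_slice, hL]
        rw [show ((k:Int)+1) = ((k+1:Nat):Int) from by push_cast; ring,
          PySem.List.slice_from_natCast]
        simp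
      have hlen' : k ≤ (((String.ofList ((name.toList.take (k+1)).reverse)) ++
          PySem.Str.slice name (some ((k+1:Nat) : Int)) none)).toList.length := by
        rw [hargL]; simp only [List.length_append, List.length_reverse, List.length_take, List.length_cons]; omega
      rw [ih _ (by omega) hlen', hargL]
      have ht : ((((cs.take k).reverse ++ [c]) ++ cs.drop k).take k) = (cs.take k).reverse := by
        rw [List.append_assoc, List.take_append_of_le_length (by simp only [List.length_reverse, List.length_take]; omega),
          List.take_of_length_le (by simp only [List.length_reverse, List.length_take]; omega)]
      have hd : ((((cs.take k).reverse ++ [c]) ++ cs.drop k).drop k) = [c] ++ cs.drop k := by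
        rw [List.append_assoc, List.drop_append_of_le_length (by simp only [List.length_reverse, List.length_take]; omega),
          List.drop_of_length_le (by simp only [List.length_reverse, List.length_take]; omega)]
        simp
      rw [ht, hd, hL]
      rw [List.take_succ_cons, List.drop_succ_cons]
      rw [show pvP (c :: cs.take k) = pvP ((cs.take k).reverse) ++ [c] from by rw [pvP]]
      simp

theorem pv_getD_natCast (chars : List Char) (i : Nat) (h : i < chars.length) :
    (PySem.List.pyGet? chars (i : Int)).getD ' ' = chars[i] := by
  rw [PySem.List.pyGet?_natCast, List.getElem?_eq_getElem h]; rfl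


theorem pvB_loop (k : Nat) : ∀ (chars : List Char) (lo : Nat) (flipped : Bool) (out : List Char),
    lo + k < chars.length →
    ∃ (lo' : Nat) (extra : List Char),
      pvAltLoop chars k (lo : Int) ((lo + k : Nat) : Int) flipped out = ((lo' : Int), out ++ extra) ∧
      (PySem.List.pyGet? chars (lo' : Int)).getD ' ' :: extra.reverse
        = (if flipped then pvP ((chars.drop lo).take (k + 1)).reverse
           else pvP ((chars.drop lo).take (k + 1))) := by
  induction k with
  | zero =>
    intro chars lo flipped out h
    refine ⟨lo, [], by simp [pvAltLoop], ?_⟩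
    have hlo : lo < chars.length := by omega
    have hseg : (chars.drop lo).take 1 = [chars[lo]] := by
      rw [List.drop_eq_getElem_cons hlo, List.take_succ_cons, List.take_zero]
    rw [hseg, pv_getD_natCast chars lo hlo]
    cases flipped <;> simp [pvP, pvP]
  | succ k ih =>
    intro chars lo flipped out h
    have hlo : lo < chars.length := by omega
    have hhi : lo + k + 1 < chars.length := by omega
    cases flipped
    · rw [pvAltLoop]
      simp only [Bool.false_eq_true, if_neg (by simp : ¬ False), Bool.not_false]
      have harg : (lo : Int) + 1 = ((lo + 1 : Nat) : Int) := by push_cast; ring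
      have harg2 : ((lo + (k+1) : Nat) : Int) = (((lo + 1) + k : Nat) : Int) := by push_cast; ring
      rw [harg, harg2]
      obtain ⟨lo', extra', heq, hspec⟩ :=
        ih chars (lo + 1) true (out ++ [(PySem.List.pyGet? chars (lo : Int)).getD ' ']) (by omega)
      refine ⟨lo', (PySem.List.pyGet? chars (lo : Int)).getD ' ' :: extra', by rw [heq]; simp, ?_⟩
      simp only [if_true] at hspec
      rw [pv_getD_natCast chars lo hlo] at *
      have hseg : (chars.drop lo).take (k + 1 + 1) = chars[lo] :: (chars.drop (lo+1)).take (k+1) := by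
        rw [List.drop_eq_getElem_cons hlo, List.take_succ_cons]
      rw [hseg]
      rw [show pvP (chars[lo] :: (chars.drop (lo+1)).take (k+1))
            = pvP ((chars.drop (lo+1)).take (k+1)).reverse ++ [chars[lo]] from by rw [pvP]]
      rw [← hspec]
      simp
    · rw [pvAltLoop]
      simp only [Bool.not_true]
      have harg : ((lo + (k+1) : Nat) : Int) - 1 = ((lo + k : Nat) : Int) := by push_cast; ring
      rw [harg]
      have hchi : (PySem.List.pyGet? chars ((lo + (k+1) : Nat) : Int)).getD ' ' = chars[lo + k + 1] := by
        rw [show ((lo + (k+1) : Nat) : Int) = ((lo + k + 1 : Nat) : Int) from by push_cast; ring,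
          pv_getD_natCast chars (lo + k + 1) hhi]
      rw [hchi]
      obtain ⟨lo', extra', heq, hspec⟩ := ih chars lo false (out ++ [chars[lo + k + 1]]) (by omega)
      refine ⟨lo', chars[lo + k + 1] :: extra', by rw [heq]; simp, ?_⟩
      simp only [Bool.false_eq_true, if_false] at hspec
      have hseg : (chars.drop lo).take (k + 1 + 1)
          = (chars.drop lo).take (k + 1) ++ [chars[lo + k + 1]] := by
        have h1 : k + 1 < (chars.drop lo).length := by simp only [List.length_drop]; omega
        rw [List.take_add_one, List.getElem?_eq_getElem h1]
        have : (chars.drop lo)[k+1]'h1 = chars[lo + k + 1] := by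
          rw [List.getElem_drop]
          rfl
        rw [this]
        rfl
      simp only [if_true]
      rw [hseg]
      rw [List.reverse_append]
      rw [show pvP ([chars[lo + k + 1]].reverse ++ ((chars.drop lo).take (k+1)).reverse)
            = pvP (chars[lo+k+1] :: ((chars.drop lo).take (k+1)).reverse) from by simp]
      rw [show pvP (chars[lo+k+1] :: ((chars.drop lo).take (k+1)).reverse)
            = pvP (((chars.drop lo).take (k+1)).reverse).reverse ++ [chars[lo+k+1]] from by rw [pvP]]
      rw [List.reverse_reverse, ← hspec]
      simp

-- ===== VERDICT (by name: the statement is the Claim_ definition above) =====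
theorem undo_recursive_reverse_up_to_n_spec : Claim_equal_undo_recursive_reverse_up_to_n := by
  intro name n _ hpre
  unfold Spec_undo_recursive_reverse_up_to_n
  obtain ⟨h1, h2⟩ := hpre
  have hm1 : 1 ≤ n.toNat := by omega
  have hm2 : n.toNat ≤ name.toList.length := by omega
  have hn : n = ((n.toNat : Nat) : Int) := by omega
  set m := n.toNat with hm
  -- A side
  have hA : (undo_recursive_reverse_up_to_n name n).toList
      = pvP (name.toList.take m) ++ name.toList.drop m := by
    rw [hn]; exact pvA_eq m name hm1 hm2
  -- B side
  have hchars : (PySem.Str.slice name none (some n)).toList = name.toList.take m := by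
    rw [PySem.Str.toList_slice, PySem.Chars.slice_eq_listSlice, PySem.List.slice_to name.toList (by omega : (0:Int) ≤ n)]
  have hdrop : (PySem.Str.slice name (some n) none).toList = name.toList.drop m := by
    rw [PySem.Str.toList_slice, PySem.Chars.slice_eq_listSlice, PySem.List.slice_from name.toList (by omega : (0:Int) ≤ n)]
  obtain ⟨lo', extra, heq, hspec⟩ :=
    pvB_loop (m - 1) (name.toList.take m) 0 false [] (by rw [List.length_take]; omega)
  have hfuel : (n - 1).toNat = m - 1 := by omega
  have hlo0 : ((0 : Nat) : Int) = (0 : Int) := rfl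
  have hhi0 : n - 1 = ((0 + (m - 1) : Nat) : Int) := by push_cast; omega
  have hB : (undo_recursive_reverse_up_to_n_alt name n).toList
      = pvP (name.toList.take m) ++ name.toList.drop m := by
    unfold undo_recursive_reverse_up_to_n_alt
    simp only [hchars, hfuel]
    rw [show (0 : Int) = ((0 : Nat) : Int) from rfl, hhi0, heq]
    simp only [List.nil_append]
    rw [String.toList_append, String.toList_ofList, hdrop, hspec]
    simp only [if_neg (by simp : ¬ (false : Bool) = true), List.drop_zero]
    rw [show m - 1 + 1 = m from by omega, List.take_of_length_le (by rw [List.length_take]; omega)]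
  have := congrArg String.ofList (hA.trans hB.symm)
  rwa [String.ofList_toList, String.ofList_toList] at this
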